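-- pv_equiv track=rewrite | github.com/haraya/MiniProyectos | Programa Enfermedades.py | siglas_x_categoria
-- ===== SOURCE A (Python) =====
-- def siglas_x_categoria(dic_triage, lista_aux):
--
--     categoria = {}
--     for sigla in lista_aux:
--         for atencion in dic_triage:
--
--             if sigla in dic_triage[atencion]:
--
--                 if atencion not in categoria:
--                     categoria[atencion] = 1
--                 else:
--                     categoria[atencion] += 1
--     return categoria
-- ===== SOURCE B (Python) =====
-- def siglas_x_categoria(dic_triage, lista_aux):
--     # inverted index: sigla -> list of atenciones (in dict order) whose list contains it
--     inv = {}
--     for atencion in dic_triage: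
--         for sigla in dict.fromkeys(dic_triage[atencion]):
--             inv.setdefault(sigla, []).append(atencion)
--     categoria = {}
--     for sigla in lista_aux:
--         for atencion in inv.get(sigla, []):
--             categoria[atencion] = categoria.get(atencion, 0) + 1
--     return categoria
-- ===== Notes on version B (the rewrite author's own statement) =====
-- stated objective: faster
-- what changed: B builds an inverted index sigla->atenciones once and a per-atencion counter by walking only each sigla's own index entry, replacing A's membership scan of every dict value for every element of lista_aux.
import Mathlib
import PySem

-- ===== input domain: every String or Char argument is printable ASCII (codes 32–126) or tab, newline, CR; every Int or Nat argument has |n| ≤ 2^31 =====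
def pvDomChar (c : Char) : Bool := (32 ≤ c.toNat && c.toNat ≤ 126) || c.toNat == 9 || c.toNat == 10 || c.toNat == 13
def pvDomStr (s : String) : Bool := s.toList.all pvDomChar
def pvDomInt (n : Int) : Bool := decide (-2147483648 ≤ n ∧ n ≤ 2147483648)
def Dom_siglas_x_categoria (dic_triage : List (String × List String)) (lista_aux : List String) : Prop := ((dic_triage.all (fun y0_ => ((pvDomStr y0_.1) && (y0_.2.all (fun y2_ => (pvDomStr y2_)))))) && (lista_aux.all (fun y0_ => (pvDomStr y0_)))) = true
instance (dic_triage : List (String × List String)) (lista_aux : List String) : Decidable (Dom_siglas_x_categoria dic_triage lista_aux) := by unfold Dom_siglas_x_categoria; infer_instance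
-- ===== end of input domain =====

-- B replaces A's per-sigla membership scan over the whole dict by an inverted index (sigla → atenciones)
-- built once, so each sigla occurrence only touches the atenciones that actually contain it (objective: faster).

-- ===== PORT A =====
def siglas_x_categoria (dic_triage : List (String × List String)) (lista_aux : List String) : List (String × Int) :=
  (lista_aux.foldl (fun categoria sigla =>
      dic_triage.foldl (fun categoria p =>
        if p.2.contains sigla then
          if categoria.contains p.1 = false then categoria.insert p.1 1
          else categoria.insert p.1 (categoria.getD p.1 0 + 1)
        else categoria) categoria)
    PySem.Dict.empty).items

-- ===== PORT B =====
def siglas_x_categoria_alt (dic_triage : List (String × List String)) (lista_aux : List String) : List (String × Int) :=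
  let inv : PySem.Dict String (List String) :=
    dic_triage.foldl (fun inv p =>
      (PySem.List.dedup p.2).foldl (fun inv sigla => inv.modify sigla [] (fun l => l ++ [p.1])) inv)
      PySem.Dict.empty
  let categoria : PySem.Dict String Int :=
    lista_aux.foldl (fun cat sigla =>
      (inv.getD sigla []).foldl (fun cat atencion => cat.modify atencion 0 (· + 1)) cat)
      PySem.Dict.empty
  categoria.items

-- ===== PRECONDITION & SPEC =====
def Spec_siglas_x_categoria (dic_triage : List (String × List String)) (lista_aux : List String) (out : List (String × Int)) : Prop := out = siglas_x_categoria_alt dic_triage lista_aux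
instance (dic_triage : List (String × List String)) (lista_aux : List String) (out : List (String × Int)) : Decidable (Spec_siglas_x_categoria dic_triage lista_aux out) := by unfold Spec_siglas_x_categoria; infer_instance

-- ===== CLAIM (what is proved, stated in full; the proofs are below) =====
def Claim_equal_siglas_x_categoria : Prop := ∀ (dic_triage : List (String × List String)) (lista_aux : List String), Dom_siglas_x_categoria dic_triage lista_aux → Spec_siglas_x_categoria dic_triage lista_aux (siglas_x_categoria dic_triage lista_aux)

-- ===== LEMMAS AND PROOFS =====

-- A's two-branch increment is exactly Dict.modify _ 0 (· + 1).
theorem pv_bump_eq (cat : PySem.Dict String Int) (k : String) :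
    (if cat.contains k = false then cat.insert k 1
     else cat.insert k (cat.getD k 0 + 1)) = cat.modify k 0 (· + 1) := by
  by_cases h : cat.contains k = true
  · simp [h, PySem.Dict.modify]
  · simp only [Bool.not_eq_true] at h
    simp [PySem.Dict.modify, PySem.Dict.getD_of_not_contains, h]

-- one dict entry's contribution to the inverted index, looked up at s
theorem pv_inner_getD (p : String × List String) (d0 : PySem.Dict String (List String)) (s : String) :
    ((PySem.List.dedup p.2).foldl (fun inv sigla => inv.modify sigla [] (fun l => l ++ [p.1])) d0).getD s []
      = d0.getD s [] ++ (if p.2.contains s then [p.1] else []) := by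
  have h1 : (PySem.List.dedup p.2).foldl (fun inv sigla => inv.modify sigla [] (fun l => l ++ [p.1])) d0
      = ((PySem.List.dedup p.2).map (fun sigla => (sigla, p.1))).foldl
          (fun inv q => inv.modify q.1 [] (fun l => l ++ [q.2])) d0 := by
    rw [List.foldl_map]
  rw [h1]
  rw [PySem.Dict.getD_foldl_modify_append]
  congr 1
  rw [List.filter_map]
  rw [show ((fun (q : String × String) => q.1 == s) ∘ fun sigla => (sigla, p.1)) = (fun x => x == s) from rfl]
  rw [List.filter_beq]
  by_cases hm : s ∈ p.2
  · rw [List.count_eq_one_of_mem (PySem.List.nodup_dedup _) ((PySem.List.mem_dedup _ _).mpr hm)]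
    simp [hm]
  · rw [List.count_eq_zero_of_not_mem (fun h => hm ((PySem.List.mem_dedup _ _).mp h))]
    simp [hm]

-- the inverted index, looked up at s, lists exactly the keys of the entries containing s, in order
theorem pv_inv_getD (dt : List (String × List String)) (d0 : PySem.Dict String (List String)) (s : String) :
    (dt.foldl (fun inv p =>
        (PySem.List.dedup p.2).foldl (fun inv sigla => inv.modify sigla [] (fun l => l ++ [p.1])) inv) d0).getD s []
      = d0.getD s [] ++ (dt.filter (fun p => p.2.contains s)).map (·.1) := by
  induction dt generalizing d0 with
  | nil => simp
  | cons p t ih =>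
    simp only [List.foldl_cons, ih, pv_inner_getD, List.filter_cons]
    by_cases h : s ∈ p.2 <;> simp [h]

-- per-sigla step: A's scan over the whole dict equals B's walk over the index entry
theorem pv_step_eq (dt : List (String × List String)) (s : String) (cat : PySem.Dict String Int) :
    dt.foldl (fun cat p => if p.2.contains s then cat.modify p.1 0 (· + 1) else cat) cat
      = ((dt.foldl (fun inv p =>
            (PySem.List.dedup p.2).foldl (fun inv sigla => inv.modify sigla [] (fun l => l ++ [p.1])) inv)
          PySem.Dict.empty).getD s []).foldl (fun cat atencion => cat.modify atencion 0 (· + 1)) cat := by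
  rw [pv_inv_getD, PySem.List.foldl_if_eq_foldl_filter, PySem.Dict.getD_empty]
  rw [List.nil_append, List.foldl_map]

-- ===== VERDICT (by name: the statement is the Claim_ definition above) =====
theorem siglas_x_categoria_spec : Claim_equal_siglas_x_categoria := by
  intro dt la _
  unfold Spec_siglas_x_categoria siglas_x_categoria siglas_x_categoria_alt
  congr 1
  apply PySem.List.foldl_congr_mem
  intro cat s _
  have hb : (fun (categoria : PySem.Dict String Int) (p : String × List String) =>
      if p.2.contains s then
        if categoria.contains p.1 = false then categoria.insert p.1 1
        else categoria.insert p.1 (categoria.getD p.1 0 + 1)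
      else categoria)
      = fun categoria p => if p.2.contains s then categoria.modify p.1 0 (· + 1) else categoria := by
    funext categoria p
    rw [← pv_bump_eq]
  rw [hb, pv_step_eq]
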